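-- pv_equiv track=rewrite | github.com/djankovik/NLP-Project | dealWith_Hashtags.py | get_tweethashtags_oh_given_vocab_vec
-- ===== SOURCE A (Python) =====
-- def get_tweethashtags_oh_given_vocab_vec(tweets_hashtags_lists,vocabulary,size=1900):
--     tweet_vectors = []
--     for tweet in tweets_hashtags_lists:
--         tweet_vector = []
--         for hashtag in vocabulary[0:size]:
--             if hashtag in tweet:
--                 tweet_vector.append(1)
--             else:
--                 tweet_vector.append(0)
--         tweet_vectors.append(tweet_vector)
--     return tweet_vectors
-- ===== SOURCE B (Python) =====
-- def get_tweethashtags_oh_given_vocab_vec(tweets_hashtags_lists, vocabulary, size=1900):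
--     vocab = vocabulary[0:size]
--     positions = {}
--     for i, h in enumerate(vocab):
--         positions[h] = positions.get(h, []) + [i]
--     tweet_vectors = []
--     for tweet in tweets_hashtags_lists:
--         vec = [0] * len(vocab)
--         for h in tweet:
--             for i in positions.get(h, []):
--                 vec[i] = 1
--         tweet_vectors.append(vec)
--     return tweet_vectors
-- ===== Notes on version B (the rewrite author's own statement) =====
-- stated objective: faster
-- what changed: Instead of scanning the whole vocabulary slice once per tweet, B builds a hashtag->positions index once and, per tweet, starts from a zero vector and sets 1s only at the positions of the tweet's own hashtags.
import Mathlib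
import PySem

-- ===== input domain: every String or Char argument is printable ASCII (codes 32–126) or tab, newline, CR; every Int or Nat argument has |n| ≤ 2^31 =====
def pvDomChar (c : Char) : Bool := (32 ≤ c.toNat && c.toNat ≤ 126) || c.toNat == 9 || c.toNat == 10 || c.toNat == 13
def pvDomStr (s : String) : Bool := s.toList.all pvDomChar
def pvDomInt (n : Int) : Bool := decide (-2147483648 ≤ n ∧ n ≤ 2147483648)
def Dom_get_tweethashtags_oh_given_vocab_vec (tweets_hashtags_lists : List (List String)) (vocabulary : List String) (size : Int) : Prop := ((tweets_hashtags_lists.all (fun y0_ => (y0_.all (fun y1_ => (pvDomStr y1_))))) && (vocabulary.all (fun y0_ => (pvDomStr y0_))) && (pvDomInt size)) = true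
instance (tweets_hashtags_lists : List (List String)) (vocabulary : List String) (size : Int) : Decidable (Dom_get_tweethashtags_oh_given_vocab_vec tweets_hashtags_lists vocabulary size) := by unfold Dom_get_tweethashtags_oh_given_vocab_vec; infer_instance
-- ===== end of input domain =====

-- B replaces A's per-tweet scan of the whole vocabulary slice by a hashtag→positions
-- index built once, filling a per-tweet zero vector only at the tweet's own hashtags.

-- ===== PORT A =====
def get_tweethashtags_oh_given_vocab_vec (tweets_hashtags_lists : List (List String)) (vocabulary : List String) (size : Int) : List (List Int) :=
  tweets_hashtags_lists.foldl
    (fun tweet_vectors tweet =>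
      tweet_vectors ++
        [(PySem.List.slice vocabulary (some 0) (some size)).foldl
          (fun tweet_vector hashtag =>
            if hashtag ∈ tweet then tweet_vector ++ [1] else tweet_vector ++ [0])
          []])
    []

-- ===== PORT B =====
-- positions[h] = positions.get(h, []) + [i]   over enumerate(vocab)
def pvPositions (vocab : List String) : PySem.Dict String (List Int) :=
  (PySem.List.enumerate vocab 0).foldl
    (fun d p => d.modify p.2 [] (fun l => l ++ [p.1]))
    PySem.Dict.empty

-- vec = [0]*len(vocab); for h in tweet: for i in positions.get(h, []): vec[i] = 1
def pvRow (positions : PySem.Dict String (List Int)) (n : Nat) (tweet : List String) : List Int :=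
  tweet.foldl
    (fun vec h => (positions.getD h []).foldl (fun vec i => PySem.List.pySetD vec i 1) vec)
    (List.replicate n 0)

def get_tweethashtags_oh_given_vocab_vec_alt (tweets_hashtags_lists : List (List String)) (vocabulary : List String) (size : Int) : List (List Int) :=
  let vocab := PySem.List.slice vocabulary (some 0) (some size)
  let positions := pvPositions vocab
  tweets_hashtags_lists.foldl
    (fun tweet_vectors tweet => tweet_vectors ++ [pvRow positions vocab.length tweet])
    []

-- ===== PRECONDITION & SPEC =====
def Spec_get_tweethashtags_oh_given_vocab_vec (tweets_hashtags_lists : List (List String)) (vocabulary : List String) (size : Int) (out : List (List Int)) : Prop := out = get_tweethashtags_oh_given_vocab_vec_alt tweets_hashtags_lists vocabulary size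
instance (tweets_hashtags_lists : List (List String)) (vocabulary : List String) (size : Int) (out : List (List Int)) : Decidable (Spec_get_tweethashtags_oh_given_vocab_vec tweets_hashtags_lists vocabulary size out) := by unfold Spec_get_tweethashtags_oh_given_vocab_vec; infer_instance

-- ===== CLAIM (what is proved, stated in full; the proofs are below) =====
def Claim_equal_get_tweethashtags_oh_given_vocab_vec : Prop := ∀ (tweets_hashtags_lists : List (List String)) (vocabulary : List String) (size : Int), Dom_get_tweethashtags_oh_given_vocab_vec tweets_hashtags_lists vocabulary size → Spec_get_tweethashtags_oh_given_vocab_vec tweets_hashtags_lists vocabulary size (get_tweethashtags_oh_given_vocab_vec tweets_hashtags_lists vocabulary size)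

-- ===== LEMMAS AND PROOFS =====

theorem pvPositions_getD (vocab : List String) (h : String) :
    (pvPositions vocab).getD h [] =
      ((PySem.List.enumerate vocab 0).filter (fun p => p.2 == h)).map (·.1) := by
  unfold pvPositions
  have := PySem.Dict.getD_foldl_modify_append
    (l := (PySem.List.enumerate vocab 0).map (fun p => (p.2, p.1)))
    (d := (PySem.Dict.empty : PySem.Dict String (List Int))) (c := h)
  rw [List.foldl_map] at this
  simp only [PySem.Dict.getD_empty, List.nil_append] at this
  rw [this, List.filter_map, List.map_map]
  rfl

theorem mem_pvPositions (vocab : List String) (h : String) (m : Nat) :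
    ((m : Int) ∈ (pvPositions vocab).getD h []) ↔ ∃ hm : m < vocab.length, vocab[m] = h := by
  rw [pvPositions_getD]
  simp only [List.mem_map, List.mem_filter, PySem.List.mem_enumerate_iff]
  constructor
  · rintro ⟨p, ⟨⟨k, hk, rfl⟩, hh⟩, hm⟩
    simp only [zero_add] at hm hh
    have : k = m := by exact_mod_cast hm
    subst this
    exact ⟨hk, by simpa using hh⟩
  · rintro ⟨hm, hv⟩
    exact ⟨((m : Int), vocab[m]), ⟨⟨m, hm, by simp⟩, by simpa using hv⟩, rfl⟩

theorem pvPositions_inrange (vocab : List String) (h : String) :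
    ∀ i ∈ (pvPositions vocab).getD h [], ∃ k : Nat, i = (k : Int) ∧ k < vocab.length := by
  rw [pvPositions_getD]
  rintro i hi
  simp only [List.mem_map, List.mem_filter, PySem.List.mem_enumerate_iff] at hi
  obtain ⟨p, ⟨⟨k, hk, rfl⟩, -⟩, rfl⟩ := hi
  exact ⟨k, by simp, hk⟩

theorem length_foldl_pySetD (is : List Int) (vec : List Int) :
    (is.foldl (fun v i => PySem.List.pySetD v i 1) vec).length = vec.length := by
  induction is generalizing vec with
  | nil => rfl
  | cons i is ih => simp [List.foldl_cons, ih, PySem.List.length_pySetD]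

theorem foldl_pySetD_pyGetD (is : List Int) (vec : List Int) (m : Nat)
    (hm : m < vec.length) (hir : ∀ i ∈ is, ∃ k : Nat, i = (k : Int) ∧ k < vec.length) :
    PySem.List.pyGetD (is.foldl (fun v i => PySem.List.pySetD v i 1) vec) (m : Int) 0 =
      if (m : Int) ∈ is then 1 else PySem.List.pyGetD vec (m : Int) 0 := by
  induction is generalizing vec with
  | nil => simp
  | cons i is ih =>
    obtain ⟨k, rfl, hk⟩ := hir i (by simp)
    rw [List.foldl_cons]
    rw [ih _ (by rw [PySem.List.length_pySetD]; exact hm)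
        (fun j hj => by
          obtain ⟨k', hk', hlt⟩ := hir j (by simp [hj])
          exact ⟨k', hk', by rwa [PySem.List.length_pySetD]⟩)]
    by_cases hmem : (m : Int) ∈ is
    · simp [hmem]
    · simp only [hmem, if_false, List.mem_cons, or_false]
      rw [PySem.List.pyGetD_pySetD_natCast vec k m 1 0 hk]
      by_cases he : m = k
      · simp [he]
      · have he' : (m : Int) ≠ (k : Int) := fun hc => he (by exact_mod_cast hc)
        simp [he, he']

theorem pvRow_step (vocab : List String) (p : String → Bool) (h : String) :
    ((pvPositions vocab).getD h []).foldl (fun v i => PySem.List.pySetD v i 1)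
        (vocab.map (fun w => if p w then (1 : Int) else 0)) =
      vocab.map (fun w => if p w || (w == h) then (1 : Int) else 0) := by
  have hlen : ∀ (l : List String) (q : String → Bool), (l.map (fun w => if q w then (1:Int) else 0)).length = l.length := by
    intro l q; simp
  apply List.ext_getElem
  · rw [length_foldl_pySetD]; simp
  · intro m hm1 hm2
    have hmv : m < vocab.length := by simpa using hm2
    have hg := foldl_pySetD_pyGetD ((pvPositions vocab).getD h [])
      (vocab.map (fun w => if p w then (1:Int) else 0)) m
      (by simpa using hmv)
      (fun i hi => by
        obtain ⟨k, hk, hklt⟩ := pvPositions_inrange vocab h i hi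
        exact ⟨k, hk, by simpa using hklt⟩)
    rw [PySem.List.pyGetD_natCast, PySem.List.pyGetD_natCast] at hg
    rw [List.getD_eq_getElem _ _ hm1, List.getD_eq_getElem _ _ (by simpa using hmv)] at hg
    rw [hg]; simp only [mem_pvPositions]
    by_cases hv : vocab[m] = h
    · simp [hv, hmv]
    · have : ¬ ∃ hh : m < vocab.length, vocab[m] = h := fun ⟨_, hc⟩ => hv hc
      simp [hv]

theorem pvRow_inv (vocab : List String) (tweet : List String) (p : String → Bool) :
    tweet.foldl (fun vec h => ((pvPositions vocab).getD h []).foldl (fun v i => PySem.List.pySetD v i 1) vec)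
        (vocab.map (fun w => if p w then (1 : Int) else 0)) =
      vocab.map (fun w => if p w || tweet.contains w then (1 : Int) else 0) := by
  induction tweet generalizing p with
  | nil => simp
  | cons h t ih =>
    rw [List.foldl_cons, pvRow_step, ih (fun w => p w || (w == h))]
    congr 1
    funext w
    by_cases h1 : p w <;> by_cases h2 : w = h <;> simp [h1, h2]

theorem pvRow_eq (vocab : List String) (tweet : List String) :
    pvRow (pvPositions vocab) vocab.length tweet =
      vocab.map (fun w => if w ∈ tweet then (1 : Int) else 0) := by
  unfold pvRow
  have h0 : (List.replicate vocab.length (0:Int)) = vocab.map (fun w => if (fun _ => false) w then (1:Int) else 0) := by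
    simp [List.map_const']
  rw [h0, pvRow_inv]
  congr 1
  funext w
  by_cases hw : w ∈ tweet <;> simp [hw]

-- ===== VERDICT (by name: the statement is the Claim_ definition above) =====
theorem get_tweethashtags_oh_given_vocab_vec_spec : Claim_equal_get_tweethashtags_oh_given_vocab_vec := by
  intro tweets vocabulary size _
  unfold Spec_get_tweethashtags_oh_given_vocab_vec
  unfold get_tweethashtags_oh_given_vocab_vec get_tweethashtags_oh_given_vocab_vec_alt
  have hinner : ∀ tweet : List String,
      (PySem.List.slice vocabulary (some 0) (some size)).foldl
        (fun tv h => if h ∈ tweet then tv ++ [(1:Int)] else tv ++ [0]) [] =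
      pvRow (pvPositions (PySem.List.slice vocabulary (some 0) (some size)))
        (PySem.List.slice vocabulary (some 0) (some size)).length tweet := by
    intro tweet
    rw [pvRow_eq]
    have hb : (fun (tv : List Int) (h : String) => if h ∈ tweet then tv ++ [(1:Int)] else tv ++ [0])
        = (fun tv h => tv ++ [if h ∈ tweet then (1:Int) else 0]) := by
      funext tv h; split <;> rfl
    rw [hb, PySem.List.foldl_append_singleton_eq_map]
    rfl
  simp only [PySem.List.foldl_append_singleton_eq_map, List.nil_append]
  exact List.map_congr_left (fun tweet _ => hinner tweet)
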